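-- pv_equiv track=rewrite | github.com/msinyakova/Semester-project | modules/IterationModule.py | doIteration
-- ===== SOURCE A (Python) =====
-- def doIteration(rules, sinput):
--     flag = True
--     i = 0
--     for rule in rules:
--         if (sinput.find(rule[0]) != -1):
--             flag = False
--         stmp = sinput.replace(rule[0], rule[1], 1)
--         if (not flag):
--             sinput = stmp
--             if (rule[2]):
--                 flag = True
--                 break
--             break
--         i += 1
--     return [sinput, flag, i]
-- ===== SOURCE B (Python) =====
-- def doIteration(rules, sinput):
--     if not rules:
--         return [sinput, True, 0]
--     pat, rep, stop = rules[0]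
--     if pat in sinput:
--         return [sinput.replace(pat, rep, 1), bool(stop), 0]
--     rest = doIteration(rules[1:], sinput)
--     return [rest[0], rest[1], rest[2] + 1]
-- ===== Notes on version B (the rewrite author's own statement) =====
-- stated objective: simpler
-- what changed: Recursion on the rule list with direct returns (match at head: replace and stop; otherwise recurse and shift the index) replaces A's flag/i/break accumulator machinery, and the replace is only computed on a match instead of speculatively every iteration.
import Mathlib
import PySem

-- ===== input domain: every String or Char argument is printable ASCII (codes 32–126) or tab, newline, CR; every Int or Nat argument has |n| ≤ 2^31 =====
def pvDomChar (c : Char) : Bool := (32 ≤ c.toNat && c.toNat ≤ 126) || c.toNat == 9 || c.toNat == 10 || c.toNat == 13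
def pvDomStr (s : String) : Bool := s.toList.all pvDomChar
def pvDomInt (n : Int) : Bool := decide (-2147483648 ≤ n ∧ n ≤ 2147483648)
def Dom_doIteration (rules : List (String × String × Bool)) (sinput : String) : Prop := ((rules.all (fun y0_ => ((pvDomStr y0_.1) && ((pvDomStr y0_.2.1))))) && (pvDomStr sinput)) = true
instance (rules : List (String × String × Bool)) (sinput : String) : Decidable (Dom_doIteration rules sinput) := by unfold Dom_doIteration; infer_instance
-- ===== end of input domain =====

-- B replaces A's flag/i/break accumulator loop by structural recursion on the rule
-- list with direct returns (objective: simpler); return values are identical.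

-- shared hand port of Python's s.replace(old, new, 1) (PySem.Str.replace has no count):
-- exact — an empty `old` is found at index 0, so `new` is prepended, as CPython does.
def pyReplace1 (s old new : String) : String :=
  let i := PySem.Str.find s old
  if i = -1 then s
  else String.ofList (s.toList.take i.toNat ++ new.toList ++ s.toList.drop (i.toNat + old.length))

-- ===== PORT A =====
def doIterationLoop : List (String × String × Bool) → String → Bool → Int → String × Bool × Int
  | [], sinput, flag, i => (sinput, flag, i)
  | rule :: rest, sinput, flag, i =>
    let flag1 := if PySem.Str.find sinput rule.1 ≠ -1 then false else flag
    let stmp := pyReplace1 sinput rule.1 rule.2.1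
    if flag1 = false then
      -- sinput = stmp; then break, with flag set back to True when rule[2] is truthy
      if rule.2.2 then (stmp, true, i) else (stmp, flag1, i)
    else
      doIterationLoop rest sinput flag1 (i + 1)

def doIteration (rules : List (String × String × Bool)) (sinput : String) : String × Bool × Int :=
  doIterationLoop rules sinput true 0

-- ===== PORT B =====
def doIteration_alt (rules : List (String × String × Bool)) (sinput : String) : String × Bool × Int :=
  match rules with
  | [] => (sinput, true, 0)
  | (pat, rep, stop) :: rs =>
    if PySem.Str.isIn pat sinput then (pyReplace1 sinput pat rep, stop, 0)
    else
      let rest := doIteration_alt rs sinput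
      (rest.1, rest.2.1, rest.2.2 + 1)

-- ===== PRECONDITION & SPEC =====
def Spec_doIteration (rules : List (String × String × Bool)) (sinput : String) (out : String × Bool × Int) : Prop := out = doIteration_alt rules sinput
instance (rules : List (String × String × Bool)) (sinput : String) (out : String × Bool × Int) : Decidable (Spec_doIteration rules sinput out) := by unfold Spec_doIteration; infer_instance

-- ===== CLAIM (what is proved, stated in full; the proofs are below) =====
def Claim_equal_doIteration : Prop := ∀ (rules : List (String × String × Bool)) (sinput : String), Dom_doIteration rules sinput → Spec_doIteration rules sinput (doIteration rules sinput)

-- ===== LEMMAS AND PROOFS =====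

theorem find_ne_neg_one_iff_isIn (s sub : List Char) :
    (PySem.Chars.find s sub ≠ -1) ↔ PySem.Chars.isIn sub s = true := by
  simp [PySem.Chars.find_eq_neg_one_iff, PySem.Chars.isIn_iff_infix]

theorem doIterationLoop_eq_alt (rules : List (String × String × Bool)) (sinput : String) (i : Int) :
    doIterationLoop rules sinput true i =
      ((doIteration_alt rules sinput).1, (doIteration_alt rules sinput).2.1,
        (doIteration_alt rules sinput).2.2 + i) := by
  induction rules generalizing i with
  | nil => simp [doIterationLoop, doIteration_alt]
  | cons rule rest ih =>
    obtain ⟨pat, rep, stop⟩ := rule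
    by_cases h : PySem.Chars.find sinput.toList pat.toList = -1
    · have hin : PySem.Chars.isIn pat.toList sinput.toList = false := by
        rcases Bool.eq_false_or_eq_true (PySem.Chars.isIn pat.toList sinput.toList) with ht | hf
        · exact absurd h ((find_ne_neg_one_iff_isIn sinput.toList pat.toList).mpr ht)
        · exact hf
      simp [doIterationLoop, doIteration_alt, h, hin, ih]
      ring_nf
    · have hin : PySem.Chars.isIn pat.toList sinput.toList = true :=
        (find_ne_neg_one_iff_isIn sinput.toList pat.toList).mp h
      cases stop <;> simp [doIterationLoop, doIteration_alt, h, hin]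

-- ===== VERDICT (by name: the statement is the Claim_ definition above) =====
theorem doIteration_spec : Claim_equal_doIteration := by
  intro rules sinput _
  unfold Spec_doIteration doIteration
  rw [doIterationLoop_eq_alt]
  simp
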